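-- pv_equiv track=rewrite | github.com/surindersingh1699/Gurbani-ASR-v4 | scripts/fix_sgpc_groq.py | build_trigram_index
-- ===== SOURCE A (Python) =====
-- from collections import defaultdict
--
-- def build_trigram_index(tuks: list[dict]) -> dict[str, list[int]]:
--     """Build character trigram index for fast candidate retrieval."""
--     index = defaultdict(list)
--     for i, tuk in enumerate(tuks):
--         text = tuk["normalized"]
--         for j in range(len(text) - 2):
--             trigram = text[j:j+3]
--             if not index[trigram] or index[trigram][-1] != i:
--                 index[trigram].append(i)
--     return index
-- ===== SOURCE B (Python) =====
-- from collections import defaultdict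
--
--
-- def _trigrams(text):
--     return [text[j:j+3] for j in range(len(text) - 2)]
--
--
-- def build_trigram_index(tuks: list[dict]) -> dict[str, list[int]]:
--     """Build character trigram index for fast candidate retrieval.
--
--     Trigram-major inversion of the scan: precompute each text's trigram set,
--     collect the corpus's distinct trigrams in first-occurrence order, then
--     build each posting list wholesale by one sweep over the per-text sets.
--     """
--     texts = [tuk["normalized"] for tuk in tuks]
--     trigsets = [set(_trigrams(t)) for t in texts]
--     index = defaultdict(list)
--     for tri in dict.fromkeys(t for tx in texts for t in _trigrams(tx)):
--         index[tri] = [i for i, s in enumerate(trigsets) if tri in s]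
--     return index
-- ===== Notes on version B (the rewrite author's own statement) =====
-- stated objective: alternative
-- what changed: A scans each document position by position, appending the doc id to a posting list unless it already ends in that id; B inverts the traversal: it precomputes each text's trigram set, collects the corpus's distinct trigrams in first-occurrence order, and then builds each trigram's posting list wholesale by sweeping the per-text sets (trigram-major instead of document-major).
import Mathlib
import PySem

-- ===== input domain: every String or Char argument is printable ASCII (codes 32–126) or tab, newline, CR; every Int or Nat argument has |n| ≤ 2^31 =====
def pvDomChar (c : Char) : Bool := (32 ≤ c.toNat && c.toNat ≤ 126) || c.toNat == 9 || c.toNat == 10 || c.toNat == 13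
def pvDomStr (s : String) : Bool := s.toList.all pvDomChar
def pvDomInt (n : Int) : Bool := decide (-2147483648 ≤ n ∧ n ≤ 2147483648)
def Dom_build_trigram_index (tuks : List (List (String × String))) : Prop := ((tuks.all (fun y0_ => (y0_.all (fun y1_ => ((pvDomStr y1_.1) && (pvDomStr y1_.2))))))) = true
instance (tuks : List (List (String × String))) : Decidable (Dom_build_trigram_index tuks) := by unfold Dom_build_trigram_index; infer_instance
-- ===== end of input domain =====

-- B replaces A's document-major position-by-position scan (conditional dedup against the
-- posting list's last element) by a trigram-major construction: collect the corpus's distinct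
-- trigrams, then build each posting list wholesale by sweeping precomputed per-text trigram sets.


-- ===== PORT A =====
-- inner-loop body of A: trigram = text[j:j+3]; if not index[trigram] or index[trigram][-1] != i: index[trigram].append(i)
def trigStepA (i : Int) (text : String) (index : PySem.Dict String (List Int)) (j : Int) : PySem.Dict String (List Int) :=
  let trigram := PySem.Str.slice text (some j) (some (j + 3))
  let cur := index.getD trigram []
  if cur = [] ∨ cur.getLast? ≠ some i then index.insert trigram (cur ++ [i]) else index

def build_trigram_index (tuks : List (List (String × String))) : List (String × List Int) :=
  ((PySem.List.enumerate tuks).foldl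
    (fun index p =>
      match PySem.Dict.get? (PySem.Dict.mk p.2) "normalized" with
      | none => index   -- Python raises KeyError here; such inputs are excluded by Pre_
      | some text =>
        (PySem.List.pyRange 0 (PySem.Str.len text - 2) 1).foldl (trigStepA p.1 text) index)
    (PySem.Dict.mk [])).items

-- ===== PORT B =====
-- helper _trigrams(text): [text[j:j+3] for j in range(len(text) - 2)]
def trigs (text : String) : List String :=
  (PySem.List.pyRange 0 (PySem.Str.len text - 2) 1).map
    (fun j => PySem.Str.slice text (some j) (some (j + 3)))

def build_trigram_index_alt (tuks : List (List (String × String))) : List (String × List Int) :=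
  -- texts = [tuk["normalized"] for tuk in tuks]  (KeyError excluded by Pre_)
  let texts := tuks.map (fun t => (PySem.Dict.mk t).getD "normalized" "")
  -- trigsets = [set(_trigrams(t)) for t in texts]
  let trigsets := texts.map (fun tx => PySem.Set.ofList (trigs tx))
  -- for tri in dict.fromkeys(...): index[tri] = [i for i, s in enumerate(trigsets) if tri in s]
  ((PySem.List.dedup (texts.flatMap (fun tx => trigs tx))).foldl
    (fun index tri =>
      index.insert tri
        (((PySem.List.enumerate trigsets).filter
            (fun p => PySem.Set.contains p.2 tri)).map (·.1)))
    (PySem.Dict.mk [])).items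

-- ===== PRECONDITION & SPEC =====
-- Pre_ excludes exactly the inputs on which A raises KeyError: a tuk without the "normalized" key.
def Pre_build_trigram_index (tuks : List (List (String × String))) : Prop :=
  (tuks.all (fun tuk => (PySem.Dict.mk tuk).contains "normalized")) = true
instance (tuks : List (List (String × String))) : Decidable (Pre_build_trigram_index tuks) := by unfold Pre_build_trigram_index; infer_instance
def pvWitness_build_trigram_index : (List (List (String × String))) :=
  [[("normalized", "abcab")], [("normalized", "bca"), ("other", "x")]]

def Spec_build_trigram_index (tuks : List (List (String × String))) (out : List (String × List Int)) : Prop := out = build_trigram_index_alt tuks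
instance (tuks : List (List (String × String))) (out : List (String × List Int)) : Decidable (Spec_build_trigram_index tuks out) := by unfold Spec_build_trigram_index; infer_instance

-- ===== CLAIM (what is proved, stated in full; the proofs are below) =====
def Claim_equal_build_trigram_index : Prop := ∀ (tuks : List (List (String × String))), Dom_build_trigram_index tuks → Pre_build_trigram_index tuks → Spec_build_trigram_index tuks (build_trigram_index tuks)

-- ===== LEMMAS AND PROOFS =====

-- B's unconditional-append step over one trigram key (the common intermediate form)
def trigStepB (i : Int) (index : PySem.Dict String (List Int)) (tri : String) : PySem.Dict String (List Int) :=
  index.insert tri (index.getD tri [] ++ [i])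

-- A's inner loop, rewritten as a fold over the list of trigram strings
def trigStepA' (i : Int) (d : PySem.Dict String (List Int)) (t : String) : PySem.Dict String (List Int) :=
  let cur := d.getD t []
  if cur = [] ∨ cur.getLast? ≠ some i then d.insert t (cur ++ [i]) else d

lemma foldA_eq_foldA' (i : Int) (text : String) (l : List Int) (d : PySem.Dict String (List Int)) :
    l.foldl (trigStepA i text) d
      = (l.map (fun j => PySem.Str.slice text (some j) (some (j + 3)))).foldl (trigStepA' i) d := by
  rw [List.foldl_map]; rfl

-- Set.add keeps every already-present element present
lemma contains_add {α : Type} [BEq α] [LawfulBEq α] (s : PySem.Set α) (x t : α)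
    (h : s.contains t = true) : (PySem.Set.add s x).contains t = true := by
  simp only [PySem.Set.add]
  split_ifs with hc
  · exact h
  · have : t ∈ s := by simpa [PySem.Set.contains] using h
    simp [PySem.Set.contains, this]

-- folding Set.add ignores elements already in the accumulator
lemma foldl_add_filter {α : Type} [BEq α] [LawfulBEq α] :
    ∀ (l : List α) (acc : PySem.Set α) (t : α), acc.contains t = true →
      l.foldl PySem.Set.add acc = (l.filter (fun s => s != t)).foldl PySem.Set.add acc := by
  intro l
  induction l with
  | nil => intro acc t _; rfl
  | cons x xs ih =>
    intro acc t ht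
    by_cases hx : x = t
    · subst hx
      have hadd : PySem.Set.add acc x = acc := by
        unfold PySem.Set.add; rw [if_pos ht]
      simp only [List.foldl_cons, List.filter_cons, bne_self_eq_false, Bool.false_eq_true,
        if_false, hadd]
      exact ih acc x ht
    · simp only [List.foldl_cons, List.filter_cons, bne_iff_ne, ne_eq, hx, not_false_iff,
        if_pos]
      exact ih (PySem.Set.add acc x) t (contains_add acc x t ht)

-- folding Set.add over elements all ≠ x keeps a leading x in front
lemma foldl_add_cons {α : Type} [BEq α] [LawfulBEq α] :
    ∀ (l : List α) (x : α) (acc : PySem.Set α), (∀ s ∈ l, s ≠ x) →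
      l.foldl PySem.Set.add (x :: acc) = x :: l.foldl PySem.Set.add acc := by
  intro l
  induction l with
  | nil => intro x acc _; rfl
  | cons s ss ih =>
    intro x acc h
    have hs : s ≠ x := h s (by simp)
    have hstep : PySem.Set.add (x :: acc) s = x :: PySem.Set.add acc s := by
      simp only [PySem.Set.add, PySem.Set.contains, List.contains_cons]
      have hb : (s == x) = false := by simpa using hs
      rw [hb, Bool.false_or]
      split_ifs with hc <;> simp
    simp only [List.foldl_cons, hstep]
    exact ih x (PySem.Set.add acc s) (fun a ha => h a (by simp [ha]))

-- PySem's ordered dedup peels its head off the tail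
lemma dedup_cons {α : Type} [BEq α] [LawfulBEq α] (t : α) (l : List α) :
    PySem.List.dedup (t :: l) = t :: PySem.List.dedup (l.filter (fun s => s != t)) := by
  simp only [PySem.List.dedup, PySem.Set.ofList, List.foldl_cons]
  have h0 : PySem.Set.add (PySem.Set.empty (α := α)) t = [t] := by
    simp [PySem.Set.add, PySem.Set.empty, PySem.Set.contains]
  rw [h0, foldl_add_filter l [t] t (by simp [PySem.Set.contains])]
  exact foldl_add_cons _ t [] (fun s hs => by
    have := List.of_mem_filter hs; simpa using this)

-- key lemma: A's conditional scan = dedup-then-unconditional-append, relative to which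
-- trigrams do not already end in i
lemma inner_eq (i : Int) :
    ∀ (ts : List String) (d : PySem.Dict String (List Int)),
      ts.foldl (trigStepA' i) d
        = (PySem.List.dedup (ts.filter (fun t => (d.getD t []).getLast? != some i))).foldl
            (trigStepB i) d := by
  intro ts
  induction ts with
  | nil => intro d; rfl
  | cons t ts ih =>
    intro d
    by_cases h : (d.getD t []).getLast? = some i
    · have hne : d.getD t [] ≠ [] := by
        intro e; rw [e] at h; simp at h
      have hstep : trigStepA' i d t = d := by
        simp only [trigStepA']
        exact if_neg (fun hor => hor.elim hne (fun hn => hn h))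
      simp only [List.foldl_cons, hstep, List.filter_cons, h, bne_self_eq_false,
        Bool.false_eq_true, if_false]
      exact ih d
    · have hstep : trigStepA' i d t = trigStepB i d t := by
        simp only [trigStepA', trigStepB]
        rw [if_pos (Or.inr h)]
      have hfilter : ((t :: ts).filter (fun s => (d.getD s []).getLast? != some i))
          = t :: ts.filter (fun s => (d.getD s []).getLast? != some i) := by
        simp [bne_iff_ne, h]
      set d' := trigStepB i d t with hd'
      have hgetD : ∀ s, d'.getD s [] = if s = t then d.getD t [] ++ [i] else d.getD s [] := by
        intro s
        simp [hd', trigStepB, PySem.Dict.getD_insert]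
      have hPd' : ∀ s, ((d'.getD s []).getLast? != some i)
          = (((d.getD s []).getLast? != some i) && (s != t)) := by
        intro s
        by_cases hs : s = t
        · subst hs; simp [hgetD s]
        · simp [hgetD s, hs]
      calc (t :: ts).foldl (trigStepA' i) d
          = ts.foldl (trigStepA' i) d' := by
            simp only [List.foldl_cons, hstep, hd']
        _ = (PySem.List.dedup (ts.filter (fun s => (d'.getD s []).getLast? != some i))).foldl
              (trigStepB i) d' := ih d'
        _ = (PySem.List.dedup ((ts.filter (fun s => (d.getD s []).getLast? != some i)).filter
              (fun s => s != t))).foldl (trigStepB i) d' := by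
            congr 2
            rw [List.filter_filter]
            exact List.filter_congr (fun s _ => by rw [hPd' s, Bool.and_comm])
        _ = (PySem.List.dedup ((t :: ts).filter
              (fun s => (d.getD s []).getLast? != some i))).foldl (trigStepB i) d := by
            rw [hfilter, dedup_cons, List.foldl_cons]

-- the per-text invariant: every id stored so far is < n
def InvLt (n : Int) (d : PySem.Dict String (List Int)) : Prop :=
  ∀ k x, x ∈ d.getD k [] → x < n

lemma inner_eq_of_inv (i : Int) (ts : List String) (d : PySem.Dict String (List Int))
    (hinv : InvLt i d) :
    ts.foldl (trigStepA' i) d = (PySem.List.dedup ts).foldl (trigStepB i) d := by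
  rw [inner_eq]
  congr 2
  apply List.filter_eq_self.2
  intro t _
  simp only [bne_iff_ne, ne_eq]
  intro h
  exact absurd (hinv t i (List.mem_of_getLast? h)) (lt_irrefl i)

-- B's unconditional append keeps every stored id ≤ i
lemma invLe_foldB (i : Int) :
    ∀ (ts : List String) (d : PySem.Dict String (List Int)),
      (∀ k x, x ∈ d.getD k [] → x ≤ i) →
      ∀ k x, x ∈ (ts.foldl (trigStepB i) d).getD k [] → x ≤ i := by
  intro ts
  induction ts with
  | nil => intro d h; exact h
  | cons t ts ih =>
    intro d h
    apply ih
    intro k x hx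
    simp only [trigStepB, PySem.Dict.getD_insert] at hx
    split_ifs at hx with hk
    · rcases List.mem_append.1 hx with h1 | h1
      · exact h t x h1
      · simp only [List.mem_singleton] at h1
        exact le_of_eq h1
    · exact h k x hx

-- A's outer loop = the document-major dedup/append fold, carrying the invariant
lemma outer_eq :
    ∀ (tuks : List (List (String × String))) (n : Int) (d : PySem.Dict String (List Int)),
      InvLt n d →
      (PySem.List.enumerate tuks n).foldl
        (fun index p =>
          match PySem.Dict.get? (PySem.Dict.mk p.2) "normalized" with
          | none => index
          | some text =>
            (PySem.List.pyRange 0 (PySem.Str.len text - 2) 1).foldl (trigStepA p.1 text) index) d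
      = (PySem.List.enumerate tuks n).foldl
        (fun index p =>
          match PySem.Dict.get? (PySem.Dict.mk p.2) "normalized" with
          | none => index
          | some text =>
            (PySem.List.dedup (trigs text)).foldl (trigStepB p.1) index) d := by
  intro tuks
  induction tuks with
  | nil => intro n d _; rfl
  | cons tuk tuks ih =>
    intro n d hinv
    rw [PySem.List.enumerate_cons]
    simp only [List.foldl_cons]
    cases hget : PySem.Dict.get? (PySem.Dict.mk tuk) "normalized" with
    | none =>
      dsimp only
      exact ih (n + 1) d (fun k x hx => by have := hinv k x hx; omega)
    | some text =>
      dsimp only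
      have hA : (PySem.List.pyRange 0 (PySem.Str.len text - 2) 1).foldl (trigStepA n text) d
          = (PySem.List.dedup (trigs text)).foldl (trigStepB n) d := by
        rw [foldA_eq_foldA']
        exact inner_eq_of_inv n (trigs text) d hinv
      rw [hA]
      apply ih
      intro k x hx
      have hle : x ≤ n := by
        refine invLe_foldB n (PySem.List.dedup (trigs text)) d ?_ k x hx
        intro k' x' hx'
        exact le_of_lt (hinv k' x' hx')
      omega

-- the document-major fold over (id, text) pairs
def stepDoc (d : PySem.Dict String (List Int)) (p : Int × String) : PySem.Dict String (List Int) :=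
  (PySem.List.dedup (trigs p.2)).foldl (trigStepB p.1) d

-- the match on get? is exactly stepDoc over getD "": a missing key contributes nothing either way
lemma match_eq_stepDoc (p : Int × List (String × String)) (d : PySem.Dict String (List Int)) :
    (match PySem.Dict.get? (PySem.Dict.mk p.2) "normalized" with
      | none => d
      | some text => (PySem.List.dedup (trigs text)).foldl (trigStepB p.1) d)
    = stepDoc d (p.1, (PySem.Dict.mk p.2).getD "normalized" "") := by
  cases hget : PySem.Dict.get? (PySem.Dict.mk p.2) "normalized" with
  | none =>
    rw [stepDoc, PySem.Dict.getD_of_get?_eq_none _ _ hget]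
    rfl
  | some text =>
    rw [stepDoc, PySem.Dict.getD_of_get?_eq_some _ _ hget]

-- enumerate commutes with map
lemma enumerate_map {α β : Type} (f : α → β) :
    ∀ (l : List α) (s : Int),
      PySem.List.enumerate (l.map f) s = (PySem.List.enumerate l s).map (fun p => (p.1, f p.2)) := by
  intro l
  induction l with
  | nil => intro s; rfl
  | cons x xs ih => intro s; simp [PySem.List.enumerate_cons, ih]

-- membership in Set.update
lemma mem_update {α : Type} [BEq α] [LawfulBEq α] :
    ∀ (xs : List α) (s : PySem.Set α) (y : α), y ∈ PySem.Set.update s xs ↔ y ∈ s ∨ y ∈ xs := by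
  intro xs
  induction xs with
  | nil => intro s y; simp [PySem.Set.update]
  | cons x xs ih =>
    intro s y
    show y ∈ PySem.Set.update (PySem.Set.add s x) xs ↔ _
    rw [ih, PySem.Set.mem_add]
    simp [or_assoc, or_comm, or_left_comm]

-- updating with an accumulated set = updating with the raw list
lemma update_foldl_add {α : Type} [BEq α] [LawfulBEq α] :
    ∀ (l : List α) (acc s : PySem.Set α),
      PySem.Set.update s (l.foldl PySem.Set.add acc) = PySem.Set.update (PySem.Set.update s acc) l := by
  intro l
  induction l with
  | nil => intro acc s; rfl
  | cons x l ih =>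
    intro acc s
    have hstep : PySem.Set.update s (PySem.Set.add acc x)
        = PySem.Set.add (PySem.Set.update s acc) x := by
      by_cases hc : acc.contains x = true
      · have hx : x ∈ acc := by simpa [PySem.Set.contains] using hc
        have hmem : x ∈ PySem.Set.update s acc := (mem_update acc s x).2 (Or.inr hx)
        have h1 : PySem.Set.add acc x = acc := by simp [PySem.Set.add, hx]
        have h2 : PySem.Set.add (PySem.Set.update s acc) x = PySem.Set.update s acc := by
          simp [PySem.Set.add, PySem.Set.contains, hmem]
        rw [h1, h2]
      · have hx' : x ∉ acc := by simpa [PySem.Set.contains] using hc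
        have h1 : PySem.Set.add acc x = acc ++ [x] := by simp [PySem.Set.add, hx']
        rw [h1]
        simp [PySem.Set.update, List.foldl_append, PySem.Set.add]
    calc PySem.Set.update s ((x :: l).foldl PySem.Set.add acc)
        = PySem.Set.update s (l.foldl PySem.Set.add (PySem.Set.add acc x)) := by
          rw [List.foldl_cons]
      _ = PySem.Set.update (PySem.Set.update s (PySem.Set.add acc x)) l := ih _ _
      _ = PySem.Set.update (PySem.Set.add (PySem.Set.update s acc) x) l := by rw [hstep]
      _ = PySem.Set.update (PySem.Set.update s acc) (x :: l) := by
          simp [PySem.Set.update, List.foldl_cons]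

lemma update_dedup {α : Type} [BEq α] [LawfulBEq α] (s : PySem.Set α) (l : List α) :
    PySem.Set.update s (PySem.List.dedup l) = PySem.Set.update s l := by
  rw [PySem.List.dedup_eq_ofList, PySem.Set.ofList]
  show PySem.Set.update s (l.foldl PySem.Set.add PySem.Set.empty) = _
  rw [update_foldl_add]
  rfl

-- keys of the document-major fold: first occurrences of all trigrams, in order
lemma keys_docMajor :
    ∀ (ps : List (Int × String)) (d : PySem.Dict String (List Int)),
      (ps.foldl stepDoc d).keys = PySem.Set.update d.keys (ps.flatMap (fun p => trigs p.2)) := by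
  intro ps
  induction ps with
  | nil => intro d; rfl
  | cons p ps ih =>
    intro d
    have hstep : (stepDoc d p).keys = PySem.Set.update d.keys (trigs p.2) := by
      rw [stepDoc,
        show trigStepB p.1 = (fun d t => d.insert t (d.getD t [] ++ [p.1])) from rfl,
        PySem.Dict.keys_foldl_insert (f := fun d t => d.getD t [] ++ [p.1]), update_dedup]
    rw [List.foldl_cons, ih, hstep, List.flatMap_cons]
    unfold PySem.Set.update
    rw [List.foldl_append]

-- value at k of one dedup/append pass
lemma getD_inner (i : Int) :
    ∀ (ts : List String) (d : PySem.Dict String (List Int)) (k : String), ts.Nodup →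
      (ts.foldl (trigStepB i) d).getD k [] = d.getD k [] ++ (if k ∈ ts then [i] else []) := by
  intro ts
  induction ts with
  | nil => intro d k _; simp
  | cons t ts ih =>
    intro d k hnd
    rw [List.foldl_cons]
    by_cases hk : k = t
    · subst hk
      have hnot : k ∉ ts := (List.nodup_cons.1 hnd).1
      rw [ih _ k (List.nodup_cons.1 hnd).2, if_neg hnot]
      simp [trigStepB, PySem.Dict.getD_insert_self]
    · rw [ih _ k (List.nodup_cons.1 hnd).2]
      have : (trigStepB i d t).getD k [] = d.getD k [] := by
        simp [trigStepB, PySem.Dict.getD_insert_of_ne _ _ _ hk]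
      rw [this]
      simp [List.mem_cons, hk]

-- value at k of the document-major fold: the ids of the documents containing k
lemma getD_docMajor :
    ∀ (ps : List (Int × String)) (d : PySem.Dict String (List Int)) (k : String),
      (ps.foldl stepDoc d).getD k []
        = d.getD k [] ++ (ps.filter (fun p => decide (k ∈ trigs p.2))).map (·.1) := by
  intro ps
  induction ps with
  | nil => intro d k; simp
  | cons p ps ih =>
    intro d k
    rw [List.foldl_cons, ih]
    have hstep : (stepDoc d p).getD k []
        = d.getD k [] ++ (if k ∈ trigs p.2 then [p.1] else []) := by
      rw [stepDoc, getD_inner p.1 _ _ k (PySem.List.nodup_dedup _)]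
      by_cases hm : k ∈ trigs p.2 <;>
        simp [hm]
    rw [hstep, List.filter_cons]
    by_cases hm : k ∈ trigs p.2 <;> simp [hm, List.append_assoc]

-- ===== VERDICT (by name: the statement is the Claim_ definition above) =====
theorem build_trigram_index_spec : Claim_equal_build_trigram_index := by
  intro tuks _ _
  unfold Spec_build_trigram_index build_trigram_index build_trigram_index_alt
  -- A's fold = the document-major fold over (id, text) pairs
  rw [outer_eq tuks 0 (PySem.Dict.mk []) (fun k x hx => by
    simp [PySem.Dict.getD, PySem.Dict.get?] at hx)]
  have hmatch : (PySem.List.enumerate tuks).foldl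
      (fun index p =>
        match PySem.Dict.get? (PySem.Dict.mk p.2) "normalized" with
        | none => index
        | some text => (PySem.List.dedup (trigs text)).foldl (trigStepB p.1) index)
      (PySem.Dict.mk [])
      = (PySem.List.enumerate (tuks.map (fun t => (PySem.Dict.mk t).getD "normalized" ""))).foldl
          stepDoc (PySem.Dict.mk []) := by
    rw [enumerate_map, List.foldl_map]
    exact PySem.List.foldl_congr_mem _ _ _ _ (fun d p _ => match_eq_stepDoc p d)
  rw [hmatch]
  set texts := tuks.map (fun t => (PySem.Dict.mk t).getD "normalized" "") with htexts
  set ps := PySem.List.enumerate texts with hps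
  -- left side items via keys + getD
  have hnodupkeys : (ps.foldl stepDoc (PySem.Dict.mk [])).keys.Nodup := by
    rw [keys_docMajor]
    exact PySem.Set.nodup_update _ _ (by simp [PySem.Dict.keys])
  rw [PySem.Dict.items_eq_map_keys _ hnodupkeys []]
  have hkeys : (ps.foldl stepDoc (PySem.Dict.mk [])).keys
      = PySem.List.dedup (texts.flatMap (fun tx => trigs tx)) := by
    rw [keys_docMajor, PySem.List.dedup_eq_ofList, ← PySem.Set.update_empty]
    have : ps.flatMap (fun p => trigs p.2) = texts.flatMap (fun tx => trigs tx) := by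
      conv_rhs => rw [← PySem.List.map_snd_enumerate texts 0]
      rw [List.flatMap_map]
    rw [this]
    rfl
  -- right side items via the fresh-keys fold
  have hfresh : ((PySem.List.dedup (texts.flatMap (fun tx => trigs tx))).foldl
      (fun index tri =>
        index.insert tri
          (((PySem.List.enumerate (texts.map (fun tx => PySem.Set.ofList (trigs tx)))).filter
              (fun p => PySem.Set.contains p.2 tri)).map (·.1)))
      (PySem.Dict.mk [])).items
      = (PySem.List.dedup (texts.flatMap (fun tx => trigs tx))).map
          (fun tri => (tri,
            (((PySem.List.enumerate (texts.map (fun tx => PySem.Set.ofList (trigs tx)))).filter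
              (fun p => PySem.Set.contains p.2 tri)).map (·.1)))) := by
    rw [PySem.Dict.items_foldl_insert_fresh _ (fun tri => tri) _ _
      (fun a _ => by simp [PySem.Dict.contains])
      (by simp)]
    simp
  rw [hfresh, hkeys]
  -- pointwise: the posting lists agree
  apply List.map_congr_left
  intro k _
  congr 1
  rw [getD_docMajor, enumerate_map, List.filter_map, List.map_map]
  have hpred : ∀ p : Int × String,
      PySem.Set.contains (PySem.Set.ofList (trigs p.2)) k = decide (k ∈ trigs p.2) := by
    intro p
    simp [PySem.Set.contains, PySem.Set.mem_ofList]
  simp only [Function.comp_def]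
  rw [List.filter_congr (fun p _ => hpred p)]
  simp [PySem.Dict.getD, PySem.Dict.get?]
  rw [hps]
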